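-- pv_equiv track=rewrite | github.com/streamlinxcompany-creator/APP_Trasnporte_Ejecutivo | Penesaurio/Controlador.py | parse_mensaje_cliente
-- ===== SOURCE A (Python) =====
-- def parse_mensaje_cliente(text):
--     nombre = ""
--     direccion = ""
--     if text:
--         parts = [p.strip() for p in text.split("|")]
--         for part in parts:
--             if ":" not in part:
--                 continue
--             key, value = part.split(":", 1)
--             key = key.strip().lower()
--             value = value.strip()
--             if key == "nombre":
--                 nombre = value
--             elif key == "direccion":
--                 direccion = value
--     return nombre, direccion
-- ===== SOURCE B (Python) =====
-- def _lookup(parts, target):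
--     # Reverse scan with early exit: the first match seen from the end is
--     # exactly the last-wins value of a forward pass.
--     for raw in reversed(parts):
--         part = raw.strip()
--         if ":" in part:
--             key, value = part.split(":", 1)
--             if key.strip().lower() == target:
--                 return value.strip()
--     return None
--
-- def parse_mensaje_cliente(text):
--     parts = text.split("|") if text else []
--     nombre = _lookup(parts, "nombre")
--     direccion = _lookup(parts, "direccion")
--     return nombre or "", direccion or ""
-- ===== Notes on version B (the rewrite author's own statement) =====
-- stated objective: alternative
-- what changed: B replaces A's single forward pass accumulating two variables (last assignment wins) by a per-field helper that scans the parts in REVERSE with an early return: the first match seen from the end is the last-wins value, so each field is found by its own independent reverse lookup.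
import Mathlib
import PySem

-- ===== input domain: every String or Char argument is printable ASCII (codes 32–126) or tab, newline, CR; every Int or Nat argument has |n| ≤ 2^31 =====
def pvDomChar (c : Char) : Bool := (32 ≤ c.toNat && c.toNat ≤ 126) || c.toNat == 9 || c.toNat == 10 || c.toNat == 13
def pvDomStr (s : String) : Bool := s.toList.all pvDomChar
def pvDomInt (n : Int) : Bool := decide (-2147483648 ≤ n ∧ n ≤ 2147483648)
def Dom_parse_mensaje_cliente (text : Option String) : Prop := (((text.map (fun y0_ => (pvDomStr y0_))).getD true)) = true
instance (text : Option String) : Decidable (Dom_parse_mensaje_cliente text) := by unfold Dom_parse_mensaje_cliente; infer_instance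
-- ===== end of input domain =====

-- B replaces A's single forward accumulating pass by two independent reverse scans with
-- early exit (first match from the end = last-wins); objective: simpler per-field lookup.

-- ===== PORT A =====
def pvStepA (st : String × String) (part : String) : String × String :=
  if PySem.Str.isIn ":" part = false then st
  else
    match PySem.Str.splitMax? part ":" 1 with
    | some (key :: value :: []) =>
        let key := PySem.Str.lower (PySem.Str.strip key)
        let value := PySem.Str.strip value
        if key = "nombre" then (value, st.2)
        else if key = "direccion" then (st.1, value)
        else st
    | _ => st  -- unreachable: split(":",1) with ":" in part yields exactly two pieces

def parse_mensaje_cliente (text : Option String) : String × String :=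
  match text with
  | none => ("", "")
  | some s =>
      if s = "" then ("", "")
      else
        let parts := ((PySem.Str.split? s "|").getD []).map PySem.Str.strip
        parts.foldl pvStepA ("", "")

-- ===== PORT B =====
-- _lookup: reverse scan realised as structural recursion on the reversed list, early return.
def pvLookup (parts : List String) (target : String) : Option String :=
  match parts with
  | [] => none
  | raw :: rest =>
      -- part = raw.strip(), inlined
      if PySem.Str.isIn ":" (PySem.Str.strip raw) then
        match PySem.Str.splitMax? (PySem.Str.strip raw) ":" 1 with
        | some (key :: value :: []) =>
            if PySem.Str.lower (PySem.Str.strip key) = target then some (PySem.Str.strip value)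
            else pvLookup rest target
        | _ => pvLookup rest target  -- unreachable, as above
      else pvLookup rest target

-- 'x or ""' on Option String: None ↦ "", some v ↦ (v if v ≠ "" else "") = v; i.e. getD "".
def parse_mensaje_cliente_alt (text : Option String) : String × String :=
  let parts : List String :=
    match text with
    | none => []
    | some s => if s = "" then [] else (PySem.Str.split? s "|").getD []
  let nombre := pvLookup parts.reverse "nombre"
  let direccion := pvLookup parts.reverse "direccion"
  (nombre.getD "", direccion.getD "")

-- ===== PRECONDITION & SPEC =====
def Spec_parse_mensaje_cliente (text : Option String) (out : String × String) : Prop := out = parse_mensaje_cliente_alt text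
instance (text : Option String) (out : String × String) : Decidable (Spec_parse_mensaje_cliente text out) := by unfold Spec_parse_mensaje_cliente; infer_instance

-- ===== CLAIM (what is proved, stated in full; the proofs are below) =====
def Claim_equal_parse_mensaje_cliente : Prop := ∀ (text : Option String), Dom_parse_mensaje_cliente text → Spec_parse_mensaje_cliente text (parse_mensaje_cliente text)

-- ===== LEMMAS AND PROOFS =====

theorem pvLookup_cons (raw : String) (rest : List String) (t : String) :
    pvLookup (raw :: rest) t = (pvLookup [raw] t).or (pvLookup rest t) := by
  simp only [pvLookup]
  cases h : PySem.Str.isIn ":" (PySem.Str.strip raw) with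
  | false => simp only [Bool.false_eq_true, if_false, Option.none_or]
  | true =>
    simp only [if_true]
    cases hs : PySem.Str.splitMax? (PySem.Str.strip raw) ":" 1 with
    | none => simp only [Option.none_or]
    | some l =>
      match l with
      | [] => simp only [Option.none_or]
      | [_] => simp only [Option.none_or]
      | key :: value :: _ :: _ => simp only [Option.none_or]
      | [key, value] =>
        by_cases hk : PySem.Str.lower (PySem.Str.strip key) = t
        · simp only [hk, if_true, Option.some_or]
        · simp only [hk, if_false, Option.none_or]

theorem pvLookup_append (xs ys : List String) (t : String) :
    pvLookup (xs ++ ys) t = (pvLookup xs t).or (pvLookup ys t) := by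
  induction xs with
  | nil => simp only [List.nil_append, pvLookup, Option.none_or]
  | cons raw rest ih =>
    rw [List.cons_append, pvLookup_cons, ih, pvLookup_cons raw rest, Option.or_assoc]

theorem getD_or (x y : Option String) (d : String) :
    (x.or y).getD d = x.getD (y.getD d) := by
  cases x <;> rfl

-- One part: A's step from (a, b) equals B's single-part lookups read through getD.
theorem pvStep_single (a b : String) (p : String) :
    pvStepA (a, b) (PySem.Str.strip p)
      = ((pvLookup [p] "nombre").getD a, (pvLookup [p] "direccion").getD b) := by
  unfold pvStepA pvLookup
  cases h : PySem.Str.isIn ":" (PySem.Str.strip p) with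
  | false => simp [pvLookup]
  | true =>
    simp only [Bool.true_eq_false, if_false, if_true]
    cases hs : PySem.Str.splitMax? (PySem.Str.strip p) ":" 1 with
    | none => rfl
    | some l =>
      match l with
      | [] => rfl
      | [_] => rfl
      | key :: value :: _ :: _ => rfl
      | [key, value] =>
        by_cases hk : PySem.Str.lower (PySem.Str.strip key) = "nombre"
        · simp [hk, pvLookup]
        · by_cases hd : PySem.Str.lower (PySem.Str.strip key) = "direccion"
          · simp [hd, pvLookup]
          · simp [hk, hd, pvLookup]

-- Whole loop: A's forward fold over stripped parts = B's reverse-scan lookups.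
theorem pvLoop_eq (l : List String) (a b : String) :
    (l.map PySem.Str.strip).foldl pvStepA (a, b)
      = ((pvLookup l.reverse "nombre").getD a, (pvLookup l.reverse "direccion").getD b) := by
  induction l generalizing a b with
  | nil => simp only [List.map_nil, List.foldl_nil, List.reverse_nil, pvLookup, Option.getD_none]
  | cons p rest ih =>
    simp only [List.map_cons, List.foldl_cons, List.reverse_cons]
    rw [pvStep_single a b p, ih, pvLookup_append, pvLookup_append, getD_or, getD_or]

-- ===== VERDICT (by name: the statement is the Claim_ definition above) =====
theorem parse_mensaje_cliente_spec : Claim_equal_parse_mensaje_cliente := by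
  intro text _
  unfold Spec_parse_mensaje_cliente parse_mensaje_cliente parse_mensaje_cliente_alt
  cases text with
  | none => rfl
  | some s =>
    by_cases hs : s = ""
    · simp [hs, pvLookup]
    · simp only [hs, if_false]
      simpa using pvLoop_eq ((PySem.Str.split? s "|").getD []) "" ""
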